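-- pv_equiv track=rewrite | github.com/PeterWolf-tw/ESOE-CS101-2015 | Assignment_HW02.py | tensComplement
-- ===== SOURCE A (Python) =====
-- def tensComplement(inputSTR):
--     ans = ""
--     if inputSTR[0] == "-":
--         for i in inputSTR[1:]:
--             ans = ans + str(9 - int(i))
--         ans = str(int(ans)+1) # ten's complement 和 nine's complement 唯一的不同之處。
--     else:
--         if inputSTR[0] == "+":
--             ans = inputSTR[1:]
--         else:
--             ans = inputSTR
--     return ans
-- ===== SOURCE B (Python) =====
-- def tensComplement(inputSTR):
--     if inputSTR[0] == "-":
--         tail = inputSTR[1:]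
--         return str(10 ** len(tail) - int(tail))
--     return inputSTR.removeprefix("+")
-- ===== Notes on version B (the rewrite author's own statement) =====
-- stated objective: simpler
-- what changed: The negative branch's digit-by-digit nine's-complement loop followed by str(int(ans)+1) is replaced by the closed-form str(10**len(tail) - int(tail)), and the '+'-stripping else-chain by removeprefix.
import Mathlib
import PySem

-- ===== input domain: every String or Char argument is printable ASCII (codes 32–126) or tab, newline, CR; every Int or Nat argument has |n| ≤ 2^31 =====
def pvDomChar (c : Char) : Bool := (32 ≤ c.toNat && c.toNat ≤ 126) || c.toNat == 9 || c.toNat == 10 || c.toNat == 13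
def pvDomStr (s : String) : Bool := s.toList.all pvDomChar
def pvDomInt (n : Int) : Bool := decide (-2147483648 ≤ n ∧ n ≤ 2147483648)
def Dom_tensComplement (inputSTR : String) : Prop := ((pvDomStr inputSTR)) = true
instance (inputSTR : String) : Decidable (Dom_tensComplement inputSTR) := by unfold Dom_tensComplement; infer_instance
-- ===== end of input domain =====

-- B replaces A's digit-by-digit nine's-complement loop + increment by the closed form
-- str(10**len(tail) - int(tail)) (objective: simpler).

-- ===== PORT A =====
-- int(i) / int(ans) raise ValueError exactly where PySem.Int.ofChars? is none; inputSTR[0]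
-- raises IndexError on ""; both are excluded by Pre_, the `getD 0` / `""` defaults are unreachable there.
def tensComplement (inputSTR : String) : String :=
  match PySem.List.pyGet? inputSTR.toList 0 with
  | none => ""
  | some c0 =>
    if c0 = '-' then
      let ans : List Char :=
        (PySem.List.slice inputSTR.toList (some 1) none).foldl
          (fun ans i => ans ++ PySem.Int.toChars (9 - (PySem.Int.ofChars? [i]).getD 0)) []
      PySem.Int.toStr ((PySem.Int.ofChars? ans).getD 0 + 1)
    else
      if c0 = '+' then String.mk (PySem.List.slice inputSTR.toList (some 1) none)
      else inputSTR

-- ===== PORT B =====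
-- int(tail) raises (ofChars? none, getD 0 unreachable under Pre_); removeprefix ported as
-- startswith test + drop (exact for a single '+' prefix).
def tensComplement_alt (inputSTR : String) : String :=
  match PySem.List.pyGet? inputSTR.toList 0 with
  | none => ""
  | some c0 =>
    if c0 = '-' then
      let tail := PySem.List.slice inputSTR.toList (some 1) none
      PySem.Int.toStr ((10 : ℤ) ^ tail.length - (PySem.Int.ofChars? tail).getD 0)
    else
      if PySem.Chars.startswith inputSTR.toList ['+'] then String.mk (inputSTR.toList.drop 1)
      else inputSTR

-- ===== PRECONDITION & SPEC =====
-- Pre_ excludes exactly the inputs where A raises: "" (IndexError on inputSTR[0]) and strings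
-- starting with '-' whose tail is empty or not all ASCII digits (ValueError from int(i)/int(ans)).
def Pre_tensComplement (inputSTR : String) : Prop :=
  inputSTR.toList ≠ [] ∧
  (inputSTR.toList.head? = some '-' →
    inputSTR.toList.drop 1 ≠ [] ∧ (inputSTR.toList.drop 1).all Char.isDigit = true)
instance (inputSTR : String) : Decidable (Pre_tensComplement inputSTR) := by
  unfold Pre_tensComplement; infer_instance

def pvWitness_tensComplement : String := "-305"

def Spec_tensComplement (inputSTR : String) (out : String) : Prop := out = tensComplement_alt inputSTR
instance (inputSTR : String) (out : String) : Decidable (Spec_tensComplement inputSTR out) := by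
  unfold Spec_tensComplement; infer_instance

-- ===== CLAIM (what is proved, stated in full; the proofs are below) =====
def Claim_equal_tensComplement : Prop := ∀ (inputSTR : String), Dom_tensComplement inputSTR → Pre_tensComplement inputSTR → Spec_tensComplement inputSTR (tensComplement inputSTR)

-- ===== LEMMAS AND PROOFS =====

-- decimal value of a digit string, Horner-style, with accumulator
def digitsAcc (a : ℕ) (cs : List Char) : ℕ :=
  cs.foldl (fun x c => x * 10 + (c.toNat - 48)) a

-- the nine's-complement of a digit character
def cpl (c : Char) : Char := Char.ofNat (105 - c.toNat)

-- PySem.Int.ofChars?'s digit evaluator is private; capture it (and its equations) by unification.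
theorem parserBundle : ∃ dv : List Char → Option ℕ, ∃ g : List Char → Bool → ℕ → Option ℕ,
    (∀ s, PySem.Int.ofChars? s =
      (have cs := (List.dropWhile PySem.Int.isIntSpace (List.dropWhile PySem.Int.isIntSpace s).reverse).reverse
       match cs with
       | '-' :: ds => Option.map (fun n => -n) (do let a ← dv ds; pure ((a : ℕ) : ℤ))
       | '+' :: ds => Option.map (fun n => n) (do let a ← dv ds; pure ((a : ℕ) : ℤ))
       | ds => Option.map (fun n => n) (do let a ← dv ds; pure ((a : ℕ) : ℤ)))) ∧
    (dv = fun x => match x with | [] => none | cs => g cs false 0) ∧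
    (∀ b a, g [] b a = if b = true then some a else none) ∧
    (∀ c cs b a, g (c :: cs) b a =
      if c.isDigit = true then g cs true (a * 10 + (c.toNat - '0'.toNat))
      else if c = '_' ∧ b = true then
        (match cs with
         | d :: _ => if d.isDigit = true then g cs false a else none
         | [] => none)
      else none) :=
  ⟨_, _, fun _ => rfl, rfl, fun _ _ => rfl, fun _ _ _ _ => rfl⟩

theorem digit_toNat {c : Char} (h : c.isDigit = true) : 48 ≤ c.toNat ∧ c.toNat ≤ 57 := by
  simp [Char.isDigit, decide_eq_true_eq] at h
  exact ⟨h.1, h.2⟩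

theorem sp_of_digit (c : Char) (h : c.isDigit = true) : PySem.Int.isIntSpace c = false := by
  simp only [PySem.Int.isIntSpace, Bool.or_eq_false_iff, decide_eq_false_iff_not]
  refine ⟨⟨⟨⟨⟨?_, ?_⟩, ?_⟩, ?_⟩, ?_⟩, ?_⟩ <;> (rintro rfl; exact absurd h (by decide))

theorem dropWhile_digit (l : List Char) (h : l.all Char.isDigit = true) :
    l.dropWhile PySem.Int.isIntSpace = l := by
  cases l with
  | nil => rfl
  | cons c t =>
    simp only [List.all_cons, Bool.and_eq_true] at h
    simp [sp_of_digit c h.1]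

theorem strip_digit (l : List Char) (h : l.all Char.isDigit = true) :
    (List.dropWhile PySem.Int.isIntSpace (List.dropWhile PySem.Int.isIntSpace l).reverse).reverse = l := by
  rw [dropWhile_digit l h, dropWhile_digit l.reverse (by simpa using h), List.reverse_reverse]

theorem g_digits (g : List Char → Bool → ℕ → Option ℕ)
    (hnil : ∀ b a, g [] b a = if b = true then some a else none)
    (hcons : ∀ c cs b a, g (c :: cs) b a =
      if c.isDigit = true then g cs true (a * 10 + (c.toNat - '0'.toNat))
      else if c = '_' ∧ b = true then
        (match cs with
         | d :: _ => if d.isDigit = true then g cs false a else none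
         | [] => none)
      else none) :
    ∀ cs, cs.all Char.isDigit = true → ∀ a, g cs true a = some (digitsAcc a cs) := by
  intro cs
  induction cs with
  | nil => intro _ a; rw [hnil]; simp [digitsAcc]
  | cons c t ih =>
    intro h a
    simp only [List.all_cons, Bool.and_eq_true] at h
    rw [hcons, if_pos h.1, ih h.2]
    rfl

theorem ofChars?_digits (ds : List Char) (hne : ds ≠ []) (hall : ds.all Char.isDigit = true) :
    PySem.Int.ofChars? ds = some ((digitsAcc 0 ds : ℕ) : ℤ) := by
  obtain ⟨dv, g, hof, hdvg, hnil, hcons⟩ := parserBundle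
  have hdvcons : ∀ c cs, dv (c :: cs) = g (c :: cs) false 0 := by
    intro c cs; rw [hdvg]
  rw [hof ds]
  simp only [strip_digit ds hall]
  obtain ⟨d, t, rfl⟩ : ∃ d t, ds = d :: t := by
    cases ds with
    | nil => exact absurd rfl hne
    | cons d t => exact ⟨d, t, rfl⟩
  simp only [List.all_cons, Bool.and_eq_true] at hall
  split
  · rename_i heq
    rw [List.cons_eq_cons] at heq
    exact absurd (heq.1 ▸ hall.1) (by decide)
  · rename_i heq
    rw [List.cons_eq_cons] at heq
    exact absurd (heq.1 ▸ hall.1) (by decide)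
  · rw [hdvcons, hcons, if_pos hall.1,
      g_digits g hnil hcons t hall.2 (0 * 10 + (d.toNat - '0'.toNat))]
    rfl

theorem digitsAcc_shift (cs : List Char) : ∀ a, digitsAcc a cs = a * 10 ^ cs.length + digitsAcc 0 cs := by
  induction cs with
  | nil => intro a; simp [digitsAcc]
  | cons c t ih =>
    intro a
    show digitsAcc (a * 10 + (c.toNat - 48)) t = a * 10 ^ (t.length + 1) + digitsAcc (0 * 10 + (c.toNat - 48)) t
    rw [ih (a * 10 + (c.toNat - 48)), ih (0 * 10 + (c.toNat - 48))]
    ring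

theorem cpl_toNat (c : Char) (h : c.isDigit = true) : (cpl c).toNat = 105 - c.toNat := by
  obtain ⟨h1, h2⟩ := digit_toNat h
  unfold cpl
  interval_cases h : c.toNat <;> simp_all

theorem cpl_digit (c : Char) (h : c.isDigit = true) : (cpl c).isDigit = true := by
  obtain ⟨h1, h2⟩ := digit_toNat h
  unfold cpl
  interval_cases h : c.toNat <;> simp_all

theorem compVal (cs : List Char) (hall : cs.all Char.isDigit = true) :
    digitsAcc 0 (cs.map cpl) + digitsAcc 0 cs + 1 = 10 ^ cs.length := by
  induction cs with
  | nil => simp [digitsAcc]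
  | cons c t ih =>
    simp only [List.all_cons, Bool.and_eq_true] at hall
    have ih' := ih hall.2
    obtain ⟨h1, h2⟩ := digit_toNat hall.1
    have e1 : digitsAcc 0 ((c :: t).map cpl) = ((cpl c).toNat - 48) * 10 ^ t.length + digitsAcc 0 (t.map cpl) := by
      show digitsAcc (0 * 10 + ((cpl c).toNat - 48)) (t.map cpl) = _
      rw [digitsAcc_shift, List.length_map]
      ring_nf
    have e2 : digitsAcc 0 (c :: t) = (c.toNat - 48) * 10 ^ t.length + digitsAcc 0 t := by
      show digitsAcc (0 * 10 + (c.toNat - 48)) t = _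
      rw [digitsAcc_shift]
      ring_nf
    rw [e1, e2, cpl_toNat c hall.1, List.length_cons, pow_succ]
    have hd : c.toNat - 48 ≤ 9 := by omega
    have h57 : 105 - c.toNat - 48 = 9 - (c.toNat - 48) := by omega
    rw [h57]
    generalize hP : (10 : ℕ) ^ t.length = P at ih' ⊢
    generalize hD : c.toNat - 48 = d at hd ⊢
    interval_cases d <;> omega

theorem toChars_small (k : ℤ) (h0 : 0 ≤ k) (h9 : k ≤ 9) :
    PySem.Int.toChars k = [Char.ofNat (48 + k.toNat)] := by
  interval_cases k <;> decide

theorem ans_eq_map (t : List Char) (hall : t.all Char.isDigit = true) :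
    t.foldl (fun ans i => ans ++ PySem.Int.toChars (9 - (PySem.Int.ofChars? [i]).getD 0)) [] = t.map cpl := by
  rw [PySem.List.foldl_congr_mem (g := fun ans i => ans ++ [cpl i])]
  · exact PySem.List.foldl_append_singleton_eq_map ..
  · intro acc x hx
    have hd : x.isDigit = true := by
      rw [List.all_eq_true] at hall
      exact hall x hx
    obtain ⟨hx1, hx2⟩ := digit_toNat hd
    have hp : PySem.Int.ofChars? [x] = some ((x.toNat - 48 : ℕ) : ℤ) := by
      rw [ofChars?_digits [x] (by simp) (by simpa using hd)]
      simp [digitsAcc]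
    rw [hp]
    have hk0 : (0 : ℤ) ≤ 9 - ((x.toNat - 48 : ℕ) : ℤ) := by omega
    have hk9 : (9 : ℤ) - ((x.toNat - 48 : ℕ) : ℤ) ≤ 9 := by omega
    simp only [Option.getD_some]
    rw [toChars_small _ hk0 hk9]
    congr 2
    unfold cpl
    congr 1
    omega

theorem neg_branch (rest : List Char) (hne : rest ≠ []) (hall : rest.all Char.isDigit = true) :
    PySem.Int.toStr ((PySem.Int.ofChars?
        (rest.foldl (fun ans i => ans ++ PySem.Int.toChars (9 - (PySem.Int.ofChars? [i]).getD 0)) [])).getD 0 + 1)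
      = PySem.Int.toStr ((10 : ℤ) ^ rest.length - (PySem.Int.ofChars? rest).getD 0) := by
  rw [ans_eq_map rest hall]
  have hmapne : rest.map cpl ≠ [] := by simpa using hne
  have hmapall : (rest.map cpl).all Char.isDigit = true := by
    rw [List.all_eq_true] at hall ⊢
    rintro x hx
    obtain ⟨c, hc, rfl⟩ := List.mem_map.mp hx
    exact cpl_digit c (hall c hc)
  rw [ofChars?_digits _ hmapne hmapall, ofChars?_digits rest hne hall]
  simp only [Option.getD_some]
  congr 1
  have h := compVal rest hall
  have hlen : (rest.map cpl).length = rest.length := List.length_map ..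
  rw [hlen] at *
  generalize hP : (10 : ℕ) ^ rest.length = P at h
  have hPZ : ((10 : ℤ)) ^ rest.length = (P : ℤ) := by rw [← hP]; push_cast; ring
  rw [hPZ]
  omega

-- ===== VERDICT (by name: the statement is the Claim_ definition above) =====
theorem tensComplement_spec : Claim_equal_tensComplement := by
  intro s _ hpre
  unfold Spec_tensComplement tensComplement tensComplement_alt
  obtain ⟨hne, hminus⟩ := hpre
  obtain ⟨c, rest, hl⟩ : ∃ c rest, s.toList = c :: rest := by
    cases h : s.toList with
    | nil => exact absurd h hne
    | cons c rest => exact ⟨c, rest, rfl⟩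
  simp only [hl, PySem.List.pyGet?_zero_cons, PySem.List.slice_from_one, List.tail_cons]
  by_cases hc : c = '-'
  · subst hc
    have hp := hminus (by simp [hl])
    rw [hl] at hp
    simp only [List.drop_one, List.tail_cons] at hp
    have hif : ∀ (X Y : String), (if ('-' : Char) = '-' then X else Y) = X := fun X Y => if_pos rfl
    rw [hif, hif]
    exact neg_branch rest hp.1 hp.2
  · rw [if_neg hc, if_neg hc]
    by_cases hplus : c = '+'
    · subst hplus
      rw [if_pos rfl, if_pos (by
        rw [PySem.Chars.startswith_iff]
        exact ⟨rest, rfl⟩)]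
      simp
    · rw [if_neg hplus, if_neg (by
        intro h
        rw [PySem.Chars.startswith_iff] at h
        obtain ⟨u, hu⟩ := h
        rw [List.cons_append] at hu
        exact hplus (List.cons_eq_cons.mp hu).1.symm)]
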